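-- pv_equiv track=rewrite | github.com/Westlake-AI/openmixup | openmixup/models/utils/merge.py | modify_r_list
-- ===== SOURCE A (Python) =====
-- from typing import Callable, List, Tuple, Union
--
-- def modify_r_list(r_list: List[int], layer_index: int, total: int) -> List[int]:
--
--     original_value = r_list[layer_index]
--     r_list[layer_index] = 0
--
--     remainder = original_value
--     num_other_layers = len(r_list) - 1
--     avg_increase = remainder // num_other_layers
--     extra = remainder % num_other_layers
--
--     for i in range(len(r_list)):
--         if i != layer_index:
--             r_list[i] += avg_increase
--
--     index = 0
--     while extra > 0:
--         if index != layer_index: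
--             r_list[index] += 1
--             extra -= 1
--         index = (index + 1) % len(r_list)
--
--     return r_list
-- ===== SOURCE B (Python) =====
-- def modify_r_list(r_list, layer_index, total):
--     original_value = r_list[layer_index]
--     r_list[layer_index] = 0
--
--     num_other_layers = len(r_list) - 1
--     avg_increase = original_value // num_other_layers
--     extra = original_value % num_other_layers
--
--     # One pass: every non-skipped index gets avg_increase, and the first
--     # `extra` of them (in increasing index order) get one unit more.
--     seen = 0
--     for i in range(len(r_list)):
--         if i != layer_index:
--             r_list[i] += avg_increase + (1 if seen < extra else 0)
--             seen += 1
--     return r_list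
-- ===== Notes on version B (the rewrite author's own statement) =====
-- stated objective: simpler
-- what changed: Replaces A's two-phase distribution (a full avg-increase pass followed by a cycling modular-index while loop that hands out the extra units) with a single pass over the indices that maintains a counter of non-skipped positions and gives the first `extra` of them one extra unit.
import Mathlib
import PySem

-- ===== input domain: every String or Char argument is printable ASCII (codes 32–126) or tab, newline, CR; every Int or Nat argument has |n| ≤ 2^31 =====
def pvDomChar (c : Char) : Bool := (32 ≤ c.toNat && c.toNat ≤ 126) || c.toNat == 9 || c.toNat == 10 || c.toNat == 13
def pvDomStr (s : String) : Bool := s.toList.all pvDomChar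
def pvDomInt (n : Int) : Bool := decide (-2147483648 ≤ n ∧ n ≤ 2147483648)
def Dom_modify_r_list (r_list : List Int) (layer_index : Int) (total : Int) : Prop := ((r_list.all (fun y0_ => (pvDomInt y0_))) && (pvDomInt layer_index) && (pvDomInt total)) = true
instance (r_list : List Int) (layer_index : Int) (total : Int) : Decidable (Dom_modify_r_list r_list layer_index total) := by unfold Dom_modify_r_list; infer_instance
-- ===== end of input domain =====

-- B replaces A's avg-pass + cycling while loop with one pass keeping a counter of
-- non-skipped indices (first `extra` of them get one unit more); objective: simpler.
-- Note: the Python A (and B) mutate r_list in place; the equivalence proved here is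
-- about the RETURN value.


-- ===== PORT A =====
-- the 'while extra > 0' loop: index cycles modulo len, each visit of a non-layer
-- index hands out one unit; fuel = len suffices under Pre_ (extra = v mod (len-1) ≤ len-2)
def pyWhileA (fuel : Nat) (r : List Int) (layer_index extra index : Int) : List Int :=
  match fuel with
  | 0 => r
  | fuel + 1 =>
    if extra > 0 then
      if index ≠ layer_index then
        pyWhileA fuel (PySem.List.pySetD r index (PySem.List.pyGetD r index 0 + 1))
          layer_index (extra - 1) (PySem.Int.mod (index + 1) (r.length : Int))
      else
        pyWhileA fuel r layer_index extra (PySem.Int.mod (index + 1) (r.length : Int))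
    else r

def modify_r_list (r_list : List Int) (layer_index : Int) (total : Int) : List Int :=
  match PySem.List.pyGet? r_list layer_index with
  | none => []          -- IndexError (outside Pre_)
  | some original_value =>
    let r1 := PySem.List.pySetD r_list layer_index 0
    let num_other_layers : Int := (r1.length : Int) - 1
    if num_other_layers = 0 then []     -- ZeroDivisionError (outside Pre_)
    else
      let avg_increase := PySem.Int.floordiv original_value num_other_layers
      let extra := PySem.Int.mod original_value num_other_layers
      let r2 := (PySem.List.pyRange 0 (r1.length : Int) 1).foldl
        (fun acc i => if i ≠ layer_index then
            PySem.List.pySetD acc i (PySem.List.pyGetD acc i 0 + avg_increase)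
          else acc) r1
      pyWhileA r2.length r2 layer_index extra 0

-- ===== PORT B =====
def modify_r_list_alt (r_list : List Int) (layer_index : Int) (total : Int) : List Int :=
  match PySem.List.pyGet? r_list layer_index with
  | none => []          -- IndexError (outside Pre_)
  | some original_value =>
    let r1 := PySem.List.pySetD r_list layer_index 0
    let num_other_layers : Int := (r1.length : Int) - 1
    if num_other_layers = 0 then []     -- ZeroDivisionError (outside Pre_)
    else
      let avg_increase := PySem.Int.floordiv original_value num_other_layers
      let extra := PySem.Int.mod original_value num_other_layers
      ((PySem.List.pyRange 0 (r1.length : Int) 1).foldl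
        (fun s i => if i ≠ layer_index then
            (PySem.List.pySetD s.1 i
               (PySem.List.pyGetD s.1 i 0 + avg_increase + (if s.2 < extra then 1 else 0)),
             s.2 + 1)
          else s) (r1, (0 : Int))).1

-- ===== PRECONDITION & SPEC =====
-- Pre_ excludes exactly the inputs where the Python raises: single-element lists
-- (ZeroDivisionError: len(r_list)-1 == 0) and layer_index out of range (IndexError);
-- B raises the same exceptions there.
def Pre_modify_r_list (r_list : List Int) (layer_index : Int) (total : Int) : Prop :=
  2 ≤ r_list.length ∧ PySem.Raise.InRange r_list.length layer_index
instance (r_list : List Int) (layer_index : Int) (total : Int) : Decidable (Pre_modify_r_list r_list layer_index total) := by unfold Pre_modify_r_list; infer_instance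

def pvWitness_modify_r_list : List Int × Int × Int := ([5, 1, 2], 0, 8)

def Spec_modify_r_list (r_list : List Int) (layer_index : Int) (total : Int) (out : List Int) : Prop := out = modify_r_list_alt r_list layer_index total
instance (r_list : List Int) (layer_index : Int) (total : Int) (out : List Int) : Decidable (Spec_modify_r_list r_list layer_index total out) := by unfold Spec_modify_r_list; infer_instance

-- ===== CLAIM (what is proved, stated in full; the proofs are below) =====
def Claim_equal_modify_r_list : Prop := ∀ (r_list : List Int) (layer_index : Int) (total : Int), Dom_modify_r_list r_list layer_index total → Pre_modify_r_list r_list layer_index total → Spec_modify_r_list r_list layer_index total (modify_r_list r_list layer_index total)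

-- ===== LEMMAS AND PROOFS =====

-- value at a nonnegative index is unchanged by a pySetD at a different index
theorem pv_getD_setD_ne (s : List Int) (i a v : Int) (ha : 0 ≤ a) (hi : 0 ≤ i)
    (hne : i ≠ a) :
    PySem.List.pyGetD (PySem.List.pySetD s i v) a 0 = PySem.List.pyGetD s a 0 := by
  obtain ⟨m, rfl⟩ : ∃ m : Nat, a = (m : Int) := ⟨a.toNat, (Int.toNat_of_nonneg ha).symm⟩
  obtain ⟨k, rfl⟩ : ∃ k : Nat, i = (k : Int) := ⟨i.toNat, (Int.toNat_of_nonneg hi).symm⟩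
  have hkm : k ≠ m := by exact_mod_cast hne
  simp [List.getD_eq_getElem?_getD, List.getElem?_set_ne hkm]

-- two pySetD's at distinct nonnegative indices commute
theorem pv_setD_comm (s : List Int) (i a v w : Int) (ha : 0 ≤ a) (hi : 0 ≤ i)
    (hne : i ≠ a) :
    PySem.List.pySetD (PySem.List.pySetD s a v) i w
      = PySem.List.pySetD (PySem.List.pySetD s i w) a v := by
  obtain ⟨m, rfl⟩ : ∃ m : Nat, a = (m : Int) := ⟨a.toNat, (Int.toNat_of_nonneg ha).symm⟩
  obtain ⟨k, rfl⟩ : ∃ k : Nat, i = (k : Int) := ⟨i.toNat, (Int.toNat_of_nonneg hi).symm⟩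
  have hkm : m ≠ k := by exact_mod_cast hne.symm
  simp only [PySem.List.pySetD_natCast]
  exact List.set_comm v w hkm

-- read-back of a just-written in-range cell
theorem pv_getD_setD_self (s : List Int) (a x : Int) (ha : 0 ≤ a)
    (hlt : a < (s.length : Int)) :
    PySem.List.pyGetD (PySem.List.pySetD s a x) a 0 = x := by
  obtain ⟨m, rfl⟩ : ∃ m : Nat, a = (m : Int) := ⟨a.toNat, (Int.toNat_of_nonneg ha).symm⟩
  have hm : m < s.length := by exact_mod_cast hlt
  simp [List.getD_eq_getElem?_getD, hm]

-- overwriting the same nonnegative index keeps only the second write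
theorem pv_setD_setD (s : List Int) (a v w : Int) (ha : 0 ≤ a) :
    PySem.List.pySetD (PySem.List.pySetD s a v) a w = PySem.List.pySetD s a w := by
  obtain ⟨m, rfl⟩ : ∃ m : Nat, a = (m : Int) := ⟨a.toNat, (Int.toNat_of_nonneg ha).symm⟩
  simp [List.set_set]

-- A's avg-pass step preserves the length
theorem pv_foldA_length (li avg : Int) (L : List Int) (s : List Int) :
    (L.foldl (fun acc i => if i ≠ li then
        PySem.List.pySetD acc i (PySem.List.pyGetD acc i 0 + avg) else acc) s).length
      = s.length := by
  induction L generalizing s with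
  | nil => rfl
  | cons x t ih => simp only [List.foldl_cons]; rw [ih]; split <;> simp [PySem.List.length_pySetD]

-- reading index a through A's avg-pass over indices ≠ a
theorem pv_getD_foldA (li avg a : Int) (ha : 0 ≤ a) (L : List Int)
    (hL : ∀ i ∈ L, 0 ≤ i ∧ i ≠ a) (s : List Int) :
    PySem.List.pyGetD (L.foldl (fun acc i => if i ≠ li then
        PySem.List.pySetD acc i (PySem.List.pyGetD acc i 0 + avg) else acc) s) a 0
      = PySem.List.pyGetD s a 0 := by
  induction L generalizing s with
  | nil => rfl
  | cons x t ih =>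
    have hx := hL x (List.mem_cons_self)
    simp only [List.foldl_cons]
    rw [ih (fun i hi => hL i (List.mem_cons_of_mem _ hi))]
    split
    · exact pv_getD_setD_ne s x a _ ha hx.1 hx.2
    · rfl

-- a pySetD at index a commutes with A's avg-pass over indices ≠ a
theorem pv_setD_foldA (li avg a v : Int) (ha : 0 ≤ a) (L : List Int)
    (hL : ∀ i ∈ L, 0 ≤ i ∧ i ≠ a) (s : List Int) :
    L.foldl (fun acc i => if i ≠ li then
        PySem.List.pySetD acc i (PySem.List.pyGetD acc i 0 + avg) else acc)
        (PySem.List.pySetD s a v)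
      = PySem.List.pySetD (L.foldl (fun acc i => if i ≠ li then
          PySem.List.pySetD acc i (PySem.List.pyGetD acc i 0 + avg) else acc) s) a v := by
  induction L generalizing s with
  | nil => rfl
  | cons x t ih =>
    have hx := hL x (List.mem_cons_self)
    simp only [List.foldl_cons]
    split
    · rw [pv_getD_setD_ne s a x v hx.1 ha (fun h => hx.2 h.symm),
        pv_setD_comm s x a v _ ha hx.1 hx.2,
        ih (fun i hi => hL i (List.mem_cons_of_mem _ hi))]
    · exact ih (fun i hi => hL i (List.mem_cons_of_mem _ hi)) s

-- once the counter has reached `extra`, B's fused pass is exactly A's avg-pass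
theorem pv_foldB_done (li avg extra : Int) (L : List Int) (s : List Int) (c : Int)
    (hc : extra ≤ c) :
    (L.foldl (fun s i => if i ≠ li then
        (PySem.List.pySetD s.1 i
           (PySem.List.pyGetD s.1 i 0 + avg + (if s.2 < extra then 1 else 0)), s.2 + 1)
      else s) (s, c)).1
    = L.foldl (fun acc i => if i ≠ li then
        PySem.List.pySetD acc i (PySem.List.pyGetD acc i 0 + avg) else acc) s := by
  induction L generalizing s c with
  | nil => rfl
  | cons x t ih =>
    simp only [List.foldl_cons]
    split
    · rw [if_neg (by omega), add_zero]; exact ih _ _ (by omega)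
    · exact ih _ _ hc

-- the while loop returns immediately when no extra units are left
theorem pv_while_done (f : Nat) (r : List Int) (li extra idx : Int) (h : extra ≤ 0) :
    pyWhileA f r li extra idx = r := by
  cases f <;> simp [pyWhileA, h]

-- at most one element of range(0, n) equals li, so at least n-1 are ≠ li
theorem pv_count_ne (nI li : Int) : (nI - 1).toNat ≤
    (PySem.List.pyRange 0 nI 1).countP (fun j => decide (j ≠ li)) := by
  have h1 : (PySem.List.pyRange 0 nI 1).countP (fun j => decide (j ≠ li))
      + (PySem.List.pyRange 0 nI 1).count li = (PySem.List.pyRange 0 nI 1).length := by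
    rw [List.count, List.length_eq_countP_add_countP (p := fun j => decide (j ≠ li))]
    congr 1
    apply List.countP_congr
    intro x _
    simp
  have h2 : (PySem.List.pyRange 0 nI 1).count li ≤ 1 := by
    by_cases hx : li ∈ PySem.List.pyRange 0 nI 1
    · rw [List.count_eq_one_of_mem (PySem.List.nodup_pyRange_one 0 nI) hx]
    · rw [List.count_eq_zero_of_not_mem hx]; omega
  have h3 : (PySem.List.pyRange 0 nI 1).length = nI.toNat := by
    rw [PySem.List.length_pyRange_one]; omega
  omega

-- MAIN INVARIANT: from index a on, A's while loop applied to A's finished avg-pass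
-- equals B's fused pass with counter c = extra - rem
theorem pv_main (nI li avg extra : Int) (f : Nat) :
    ∀ (a : Int) (s : List Int) (c : Int), 0 ≤ a → a ≤ nI → (s.length : Int) = nI →
    c ≤ extra →
    extra - c ≤ ((PySem.List.pyRange a nI 1).countP (fun j => decide (j ≠ li)) : Int) →
    (nI - a).toNat ≤ f →
    pyWhileA f ((PySem.List.pyRange a nI 1).foldl (fun acc i => if i ≠ li then
        PySem.List.pySetD acc i (PySem.List.pyGetD acc i 0 + avg) else acc) s)
      li (extra - c) a
    = ((PySem.List.pyRange a nI 1).foldl (fun s i => if i ≠ li then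
        (PySem.List.pySetD s.1 i
           (PySem.List.pyGetD s.1 i 0 + avg + (if s.2 < extra then 1 else 0)), s.2 + 1)
      else s) (s, c)).1 := by
  induction f with
  | zero =>
    intro a s c ha haN hlen hc hcount hf
    have hae : a = nI := by omega
    subst hae
    rw [PySem.List.pyRange_one_eq_nil (le_refl _)]
    rfl
  | succ f ih =>
    intro a s c ha haN hlen hc hcount hf
    by_cases hrem : extra - c ≤ 0
    · rw [pv_while_done _ _ _ _ _ hrem, pv_foldB_done _ _ _ _ _ _ (by omega)]
    · have hlt : a < nI := by
        by_contra h
        rw [PySem.List.pyRange_one_eq_nil (by omega)] at hcount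
        simp at hcount; omega
      have hmem : ∀ i ∈ PySem.List.pyRange (a + 1) nI 1, 0 ≤ i ∧ i ≠ a := by
        intro i hi
        rw [PySem.List.mem_pyRange_one] at hi
        exact ⟨by omega, by omega⟩
      rw [PySem.List.pyRange_one_cons hlt]
      simp only [List.foldl_cons]
      rw [PySem.List.pyRange_one_cons hlt, List.countP_cons] at hcount
      by_cases hli : a = li
      · -- the skipped index: both programs leave it alone
        have hne : ¬ (a ≠ li) := by simp [hli]
        simp only [if_neg hne]
        have hpa : (decide (a ≠ li)) = false := by simp [hli]
        simp only [hpa, Bool.false_eq_true, if_false, add_zero] at hcount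
        have hcnt : extra - c ≤
            ((PySem.List.pyRange (a + 1) nI 1).countP (fun j => decide (j ≠ li)) : Int) := hcount
        have hlt2 : a + 1 < nI := by
          by_contra h
          rw [PySem.List.pyRange_one_eq_nil (by omega)] at hcnt
          simp at hcnt; omega
        have hstep : pyWhileA (f + 1)
            ((PySem.List.pyRange (a + 1) nI 1).foldl (fun acc i => if i ≠ li then
              PySem.List.pySetD acc i (PySem.List.pyGetD acc i 0 + avg) else acc) s)
            li (extra - c) a
            = pyWhileA f
            ((PySem.List.pyRange (a + 1) nI 1).foldl (fun acc i => if i ≠ li then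
              PySem.List.pySetD acc i (PySem.List.pyGetD acc i 0 + avg) else acc) s)
            li (extra - c) (PySem.Int.mod (a + 1)
              (((PySem.List.pyRange (a + 1) nI 1).foldl (fun acc i => if i ≠ li then
                PySem.List.pySetD acc i (PySem.List.pyGetD acc i 0 + avg) else acc) s).length : Int)) := by
          simp only [pyWhileA, if_pos (show extra - c > 0 by omega), if_neg hne]
      -- the index wraps only after the loop is already finished; here a+1 < nI
        rw [hstep, pv_foldA_length, hlen,
          PySem.Int.mod_eq_emod_of_pos (by omega), Int.emod_eq_of_lt (by omega) (by omega)]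
        exact ih (a + 1) s c (by omega) (by omega) hlen hc hcnt (by omega)
      · -- a genuine other layer: it receives avg (+1 while extra lasts)
        have hne : (a ≠ li) := hli
        simp only [if_pos hne]
        have hpa : (decide (a ≠ li)) = true := by simp [hne]
        simp only [hpa, if_true] at hcount
        have hcnt : extra - c - 1 ≤
            ((PySem.List.pyRange (a + 1) nI 1).countP (fun j => decide (j ≠ li)) : Int) := by
          push_cast at hcount ⊢
          omega
        have hgetFa := pv_getD_foldA li avg a (by omega) _ hmem
          (PySem.List.pySetD s a (PySem.List.pyGetD s a 0 + avg))
        have hstep : pyWhileA (f + 1)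
            ((PySem.List.pyRange (a + 1) nI 1).foldl (fun acc i => if i ≠ li then
              PySem.List.pySetD acc i (PySem.List.pyGetD acc i 0 + avg) else acc)
              (PySem.List.pySetD s a (PySem.List.pyGetD s a 0 + avg)))
            li (extra - c) a
            = pyWhileA f
            ((PySem.List.pyRange (a + 1) nI 1).foldl (fun acc i => if i ≠ li then
              PySem.List.pySetD acc i (PySem.List.pyGetD acc i 0 + avg) else acc)
              (PySem.List.pySetD s a (PySem.List.pyGetD s a 0 + avg + 1)))
            li (extra - c - 1) (PySem.Int.mod (a + 1) (s.length : Int)) := by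
          simp only [pyWhileA, if_pos (show extra - c > 0 by omega), if_pos hne]
          rw [hgetFa, pv_getD_setD_self s a _ (by omega) (by omega),
            pv_setD_foldA li avg a _ (by omega) _ hmem,
            pv_setD_setD _ a _ _ (by omega),
            ← pv_setD_foldA li avg a _ (by omega) _ hmem,
            PySem.List.length_pySetD, pv_foldA_length]
        rw [hstep]
        have hc1 : c < extra := by omega
        simp only [if_pos hc1]
        by_cases hfin : extra - c - 1 ≤ 0
        · -- last unit handed out right here: both loops only add avg from now on
          rw [pv_while_done _ _ _ _ _ hfin, pv_foldB_done _ _ _ _ _ _ (by omega)]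
        · have hlt2 : a + 1 < nI := by
            by_contra h
            rw [PySem.List.pyRange_one_eq_nil (by omega)] at hcnt
            simp at hcnt; omega
          rw [PySem.Int.mod_eq_emod_of_pos (by omega), Int.emod_eq_of_lt (by omega) (by omega)]
          have := ih (a + 1) (PySem.List.pySetD s a (PySem.List.pyGetD s a 0 + avg + 1)) (c + 1)
            (by omega) (by omega) (by rw [PySem.List.length_pySetD]; exact hlen)
            (by omega) (by omega) (by omega)
          rw [show extra - c - 1 = extra - (c + 1) by ring]
          exact this

-- ===== VERDICT (by name: the statement is the Claim_ definition above) =====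
theorem modify_r_list_spec : Claim_equal_modify_r_list := by
  intro r_list layer_index total _hDom hPre
  obtain ⟨hlen2, hIR⟩ := hPre
  unfold Spec_modify_r_list
  cases hg : PySem.List.pyGet? r_list layer_index with
  | none =>
    rw [PySem.List.pyGet?_eq_none_iff] at hg
    exact absurd hIR hg
  | some v =>
    simp only [modify_r_list, modify_r_list_alt, hg, PySem.List.length_pySetD, pv_foldA_length]
    have hnum : ¬ ((r_list.length : Int) - 1 = 0) := by
      have : 2 ≤ r_list.length := hlen2
      omega
    rw [if_neg hnum, if_neg hnum]
    have hpos : (0 : Int) < (r_list.length : Int) - 1 := by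
      have : 2 ≤ r_list.length := hlen2
      omega
    have hex0 : 0 ≤ PySem.Int.mod v ((r_list.length : Int) - 1) :=
      PySem.Int.mod_nonneg v hpos
    have hexlt : PySem.Int.mod v ((r_list.length : Int) - 1) < (r_list.length : Int) - 1 :=
      PySem.Int.mod_lt v hpos
    have hcount := pv_count_ne (r_list.length : Int) layer_index
    have := pv_main (r_list.length : Int) layer_index
      (PySem.Int.floordiv v ((r_list.length : Int) - 1))
      (PySem.Int.mod v ((r_list.length : Int) - 1))
      r_list.length 0 (PySem.List.pySetD r_list layer_index 0) 0
      (le_refl 0) (by omega) (by rw [PySem.List.length_pySetD]) (by omega)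
      (by omega) (by omega)
    simpa using this
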